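-- pv_equiv track=rewrite | github.com/PavelMystic/AdventOfCode | Day_7/day_seven.py | apply_jokers
-- ===== SOURCE A (Python) =====
-- CARD_STRENGTH: dict[str, int] = {
--     "A": 12,
--     "K": 11,
--     "Q": 10,
--     "T": 8,
--     "9": 7,
--     "8": 6,
--     "7": 5,
--     "6": 4,
--     "5": 3,
--     "4": 2,
--     "3": 1,
--     "2": 0,
--     "J": -1,
-- }
--
-- CardHist = dict[str, int]
--
-- def apply_jokers(card_hist: CardHist) -> CardHist:
--     """This function modifies the card histogram in such a way, that if there are some jokers in the
--     hand, they are used to enhance it so that the type is as high as possible.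
--
--     Args:
--         card_hist (CardHist): dictionary of card name and its count in hand (only card that
--         are actually in the hand)
--     Returns:
--         CardHist: modified card histogram
--     """
--
--     if "J" not in card_hist.keys():
--         return card_hist
--
--     n_jokers: int = card_hist["J"]
--
--     if n_jokers == 5:
--         return card_hist
--
--     max_count: int = max((card_hist[key] for key in card_hist.keys() if "J" not in key))
--
--     max_cards: list[str] = [
--         key
--         for key in card_hist.keys()
--         if card_hist[key] == max_count and "J" not in key
--     ]
--     max_cards = sorted(max_cards, key=lambda x: CARD_STRENGTH[x])
--
--     card_hist[max_cards[0]] += n_jokers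
--     del card_hist["J"]
--
--     return card_hist
-- ===== SOURCE B (Python) =====
-- CARD_STRENGTH: dict[str, int] = {
--     "A": 12,
--     "K": 11,
--     "Q": 10,
--     "T": 8,
--     "9": 7,
--     "8": 6,
--     "7": 5,
--     "6": 4,
--     "5": 3,
--     "4": 2,
--     "3": 1,
--     "2": 0,
--     "J": -1,
-- }
--
--
-- def apply_jokers(card_hist):
--     """Single-pass argmax replacing A's max/filter/sort pipeline: scan the items
--     once keeping the best (highest count, then lowest strength, then earliest)
--     non-joker card, then move the jokers onto it.  Mutates card_hist in place,
--     like the original.  Cards missing from the strength table rank weakest."""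
--     n_jokers = card_hist.get("J")
--     if n_jokers is None or n_jokers == 5:
--         return card_hist
--     best_key = None
--     best_count = 0
--     for key, count in card_hist.items():
--         if "J" in key:
--             continue
--         if best_key is None or count > best_count or (
--             count == best_count
--             and CARD_STRENGTH.get(key, 13) < CARD_STRENGTH.get(best_key, 13)
--         ):
--             best_key, best_count = key, count
--     card_hist[best_key] += n_jokers
--     del card_hist["J"]
--     return card_hist
-- ===== Notes on version B (the rewrite author's own statement) =====
-- stated objective: alternative
-- what changed: Replaces A's three-stage selection (max over counts, filter comprehension of max-count cards, sort by strength and take the head) by a single fold over the items that keeps the best non-joker entry (highest count, then lowest strength, then earliest), so no intermediate lists are built and nothing is sorted.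
import Mathlib
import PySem

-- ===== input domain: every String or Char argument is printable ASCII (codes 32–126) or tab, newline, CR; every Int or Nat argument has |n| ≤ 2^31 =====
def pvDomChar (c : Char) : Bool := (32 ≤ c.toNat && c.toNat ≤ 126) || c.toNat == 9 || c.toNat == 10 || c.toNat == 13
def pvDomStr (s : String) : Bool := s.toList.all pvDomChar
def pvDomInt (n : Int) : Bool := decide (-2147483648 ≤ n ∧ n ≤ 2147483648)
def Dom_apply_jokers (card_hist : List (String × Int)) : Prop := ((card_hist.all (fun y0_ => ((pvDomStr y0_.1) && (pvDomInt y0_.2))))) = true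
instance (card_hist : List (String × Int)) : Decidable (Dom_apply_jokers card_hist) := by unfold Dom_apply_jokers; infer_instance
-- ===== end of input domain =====

-- B replaces A's three-stage selection (max of counts, filter comprehension, sort by strength)
-- by a single fold that keeps the best non-joker entry (highest count, then lowest strength);
-- both Pythons mutate the dict in place identically, the equivalence proved is about the returned dict.

-- ===== PORT A =====
def CARD_STRENGTH : PySem.Dict String Int :=
  PySem.Dict.mk [("A",12),("K",11),("Q",10),("T",8),("9",7),("8",6),("7",5),("6",4),("5",3),("4",2),("3",1),("2",0),("J",-1)]

def apply_jokers (card_hist : List (String × Int)) : List (String × Int) :=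
  let d : PySem.Dict String Int := PySem.Dict.mk card_hist
  if d.contains "J" = false then card_hist                       -- if "J" not in card_hist.keys(): return card_hist
  else
    let n_jokers : Int := (d.get? "J").getD 0                    -- card_hist["J"]  (key present by the guard)
    if n_jokers = 5 then card_hist
    else
      let max_count : Int :=                                     -- max(card_hist[key] for key in keys if "J" not in key)
        (PySem.List.max? ((d.keys.filter (fun k => !(PySem.Str.isIn "J" k))).map (fun k => d.getD k 0)) (fun x => x)).getD 0
        -- Python raises ValueError on an empty generator: excluded by Pre_, the .getD 0 is unreachable there
      let max_cards : List String :=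
        d.keys.filter (fun k => d.getD k 0 == max_count && !(PySem.Str.isIn "J" k))
      let sorted_cards : List String :=
        PySem.List.sorted max_cards (fun x => CARD_STRENGTH.getD x 0) false
        -- CARD_STRENGTH[x]: a KeyError here is excluded by Pre_, the .getD 0 is Python-exact on its keys
      match sorted_cards with
      | [] => card_hist                                          -- unreachable under Pre_ (Python raises IndexError)
      | target :: _ => ((d.modify target 0 (fun v => v + n_jokers)).erase "J").items

-- ===== PORT B =====
-- loop body of Source B: keep the best (highest count, then lowest strength, then earliest) non-joker entry
def pvBestStep (best : Option (String × Int)) (p : String × Int) : Option (String × Int) :=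
  if PySem.Str.isIn "J" p.1 then best                            -- if "J" in key: continue
  else
    match best with
    | none => some p
    | some b =>
      if p.2 > b.2 ∨ (p.2 = b.2 ∧ CARD_STRENGTH.getD p.1 13 < CARD_STRENGTH.getD b.1 13)
      then some p else some b

def apply_jokers_alt (card_hist : List (String × Int)) : List (String × Int) :=
  let d : PySem.Dict String Int := PySem.Dict.mk card_hist
  match d.get? "J" with                                          -- n_jokers = card_hist.get("J")
  | none => card_hist
  | some n_jokers =>
    if n_jokers = 5 then card_hist
    else
      match d.items.foldl pvBestStep none with
      | none => card_hist                                        -- unreachable under Pre_ (Python raises KeyError on None)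
      | some b => ((d.modify b.1 0 (fun v => v + n_jokers)).erase "J").items

-- ===== PRECONDITION & SPEC =====
def pvNonJ (p : String × Int) : Bool := !(PySem.Str.isIn "J" p.1)
def pvCards : List String := ["A","K","Q","T","9","8","7","6","5","4","3","2","J"]

-- Pre_ excludes exactly the inputs on which Python A raises (ValueError from max() when no
-- non-joker card exists, KeyError when a non-joker card of maximal count is missing from
-- CARD_STRENGTH), and lists with duplicate keys, which do not represent a Python dict.
def Pre_apply_jokers (card_hist : List (String × Int)) : Prop :=
  (card_hist.map Prod.fst).Nodup ∧
  ((∃ p ∈ card_hist, p.1 = "J" ∧ p.2 ≠ 5) →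
    (card_hist.filter pvNonJ ≠ [] ∧
     ∀ p ∈ card_hist.filter pvNonJ,
       (∀ q ∈ card_hist.filter pvNonJ, q.2 ≤ p.2) → p.1 ∈ pvCards))
instance (card_hist : List (String × Int)) : Decidable (Pre_apply_jokers card_hist) := by
  unfold Pre_apply_jokers; infer_instance

def pvWitness_apply_jokers : (List (String × Int)) := [("J", 1), ("A", 2)]

def Spec_apply_jokers (card_hist : List (String × Int)) (out : List (String × Int)) : Prop := out = apply_jokers_alt card_hist
instance (card_hist : List (String × Int)) (out : List (String × Int)) : Decidable (Spec_apply_jokers card_hist out) := by unfold Spec_apply_jokers; infer_instance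

-- ===== CLAIM (what is proved, stated in full; the proofs are below) =====
def Claim_equal_apply_jokers : Prop := ∀ (card_hist : List (String × Int)), Dom_apply_jokers card_hist → Pre_apply_jokers card_hist → Spec_apply_jokers card_hist (apply_jokers card_hist)

-- ===== LEMMAS AND PROOFS =====

-- B's fold ignores joker entries
lemma pvFold_filter (l : List (String × Int)) (acc : Option (String × Int)) :
    l.foldl pvBestStep acc = (l.filter pvNonJ).foldl pvBestStep acc := by
  induction l generalizing acc with
  | nil => rfl
  | cons x xs ih =>
    rw [List.foldl_cons]
    by_cases hx : PySem.Chars.isIn ['J'] x.1.toList = true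
    · have h1 : pvBestStep acc x = acc := by simp [pvBestStep, hx]
      have h2 : List.filter pvNonJ (x :: xs) = List.filter pvNonJ xs := by
        simp [pvNonJ, hx]
      rw [h1, h2, ih]
    · have h2 : List.filter pvNonJ (x :: xs) = x :: List.filter pvNonJ xs := by
        simp [pvNonJ, hx]
      rw [h2, List.foldl_cons, ih]

-- over non-joker entries the fold never returns none and its result is lexicographically minimal
lemma pvFold_min (l : List (String × Int)) (b : String × Int)
    (hl : ∀ p ∈ l, pvNonJ p = true) (hb : pvNonJ b = true) :
    ∃ r, l.foldl pvBestStep (some b) = some r ∧ r ∈ b :: l ∧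
      ∀ q ∈ b :: l, q.2 ≤ r.2 ∧ (q.2 = r.2 → CARD_STRENGTH.getD r.1 13 ≤ CARD_STRENGTH.getD q.1 13) := by
  induction l generalizing b with
  | nil => exact ⟨b, rfl, by simp, by simp⟩
  | cons x xs ih =>
    have hx : pvNonJ x = true := hl x (by simp)
    have hxs : ∀ p ∈ xs, pvNonJ p = true := fun p hp => hl p (by simp [hp])
    have hxJ : PySem.Chars.isIn ['J'] x.1.toList = false := by
      simpa [pvNonJ] using hx
    by_cases hlt : x.2 > b.2 ∨ (x.2 = b.2 ∧ CARD_STRENGTH.getD x.1 13 < CARD_STRENGTH.getD b.1 13)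
    · obtain ⟨r, hr, hmem, hmin⟩ := ih x hxs hx
      have hstep : pvBestStep (some b) x = some x := by simp [pvBestStep, hxJ, hlt]
      refine ⟨r, by rw [List.foldl_cons, hstep]; exact hr, List.mem_cons_of_mem b hmem, ?_⟩
      intro q hq
      rcases List.mem_cons.mp hq with rfl | hq2
      · -- q = b : dominated by x, which the minimum covers
        have hx' := hmin x (List.mem_cons_self)
        rcases hlt with hgt | ⟨heq, hstr⟩
        · exact ⟨le_trans (le_of_lt hgt) hx'.1, fun hq2 => by have := hx'.1; omega⟩
        · refine ⟨heq ▸ hx'.1, fun hq2 => le_trans (hx'.2 (by omega)) (le_of_lt hstr)⟩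
      · exact hmin q hq2
    · obtain ⟨r, hr, hmem, hmin⟩ := ih b hxs hb
      have hstep : pvBestStep (some b) x = some b := by simp [pvBestStep, hxJ, hlt]
      push Not at hlt
      refine ⟨r, by rw [List.foldl_cons, hstep]; exact hr, ?_, ?_⟩
      · rcases List.mem_cons.mp hmem with rfl | h
        · exact List.mem_cons_self
        · exact List.mem_cons_of_mem b (List.mem_cons_of_mem x h)
      · intro q hq
        rcases List.mem_cons.mp hq with rfl | hq2
        · exact hmin q List.mem_cons_self
        · rcases List.mem_cons.mp hq2 with rfl | hq3
          · -- q = x : dominated by b, which the minimum covers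
            have hb' := hmin b List.mem_cons_self
            refine ⟨le_trans hlt.1 hb'.1, fun hq4 => ?_⟩
            have h3 : b.2 = r.2 := by have := hb'.1; have := hlt.1; omega
            exact le_trans (hb'.2 h3) (hlt.2 (by omega))
          · exact hmin q (List.mem_cons_of_mem b hq3)

-- strengths are injective on the card table
lemma pvStrength_inj : ∀ a ∈ pvCards, ∀ b ∈ pvCards,
    CARD_STRENGTH.getD a 13 = CARD_STRENGTH.getD b 13 → a = b := by decide

theorem apply_jokers_spec : Claim_equal_apply_jokers := by
  intro h hDom hPre
  unfold Spec_apply_jokers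
  obtain ⟨hnd, hJcase⟩ := hPre
  have hknd : (PySem.Dict.mk h).keys.Nodup := hnd
  cases hgj : (PySem.Dict.mk h).get? "J" with
  | none =>
    have hc : (PySem.Dict.mk h).contains "J" = false := by
      rw [PySem.Dict.contains_eq_isSome_get?, hgj]; rfl
    simp [apply_jokers, apply_jokers_alt, hc, hgj]
  | some n =>
    have hc : (PySem.Dict.mk h).contains "J" = true := by
      rw [PySem.Dict.contains_eq_isSome_get?, hgj]; rfl
    by_cases h5 : n = 5
    · simp [apply_jokers, apply_jokers_alt, hc, hgj, h5]
    · have hmemJ : ("J", n) ∈ h :=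
        (PySem.Dict.get?_eq_some_iff_mem_items (PySem.Dict.mk h) "J" n hknd).mp hgj
      obtain ⟨hgne, hstrtab⟩ := hJcase ⟨("J", n), hmemJ, rfl, h5⟩
      obtain ⟨x, xs, hgx⟩ : ∃ x xs, h.filter pvNonJ = x :: xs := by
        cases hcg : h.filter pvNonJ with
        | nil => exact absurd hcg hgne
        | cons a l => exact ⟨a, l, rfl⟩
      have hgall : ∀ p ∈ h.filter pvNonJ, pvNonJ p = true := fun p hp => (List.mem_filter.mp hp).2
      obtain ⟨r, hr, hrmem0, hrmin0⟩ :=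
        pvFold_min xs x (fun p hp => hgall p (hgx ▸ List.mem_cons_of_mem x hp))
          (hgall x (hgx ▸ List.mem_cons_self))
      have hrmem : r ∈ h.filter pvNonJ := by rw [hgx]; exact hrmem0
      have hrmin : ∀ q ∈ h.filter pvNonJ, q.2 ≤ r.2 ∧
          (q.2 = r.2 → CARD_STRENGTH.getD r.1 13 ≤ CARD_STRENGTH.getD q.1 13) := by
        rw [hgx]; exact hrmin0
      have hxnonJ : PySem.Chars.isIn ['J'] x.1.toList = false := by
        have := hgall x (hgx ▸ List.mem_cons_self); simpa [pvNonJ] using this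
      have hfold : h.foldl pvBestStep none = some r := by
        rw [pvFold_filter, hgx, List.foldl_cons]
        have hstep : pvBestStep none x = some x := by simp [pvBestStep, hxnonJ]
        rw [hstep]; exact hr
      have hget : ∀ p ∈ h, (PySem.Dict.mk h).getD p.1 0 = p.2 := fun p hp =>
        PySem.Dict.getD_of_mem_items (PySem.Dict.mk h) hp hknd 0
      have hkf : ((h.map (fun p => p.1)).filter (fun k => !(PySem.Str.isIn "J" k)))
          = (h.filter pvNonJ).map (fun p => p.1) := by
        rw [List.filter_map]; rfl
      have hvals : ((h.filter pvNonJ).map (fun p => p.1)).map (fun k => (PySem.Dict.mk h).getD k 0)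
          = (h.filter pvNonJ).map (fun p => p.2) := by
        rw [List.map_map]
        exact List.map_congr_left (fun p hp => hget p (List.mem_filter.mp hp).1)
      obtain ⟨M, hM⟩ : ∃ M, PySem.List.max? ((h.filter pvNonJ).map (fun p => p.2)) (fun v => v) = some M := by
        cases hm : PySem.List.max? ((h.filter pvNonJ).map (fun p => p.2)) (fun v => v) with
        | none =>
          exfalso
          have := (PySem.List.max?_eq_none_iff _ _).mp hm
          rw [hgx] at this; simp at this
        | some m => exact ⟨m, rfl⟩
      have hMmax : ∀ y ∈ (h.filter pvNonJ).map (fun p => p.2), y ≤ M := PySem.List.max?_isMax hM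
      have hMmem : M ∈ (h.filter pvNonJ).map (fun p => p.2) := PySem.List.max?_mem hM
      have hrM : r.2 = M := by
        obtain ⟨q, hqg, hq2⟩ := List.mem_map.mp hMmem
        have h1 : r.2 ≤ M := hMmax r.2 (List.mem_map.mpr ⟨r, hrmem, rfl⟩)
        have h2 : M ≤ r.2 := hq2 ▸ (hrmin q hqg).1
        omega
      have hmc : (h.map (fun p => p.1)).filter
            (fun k => (PySem.Dict.mk h).getD k 0 == M && !(PySem.Str.isIn "J" k))
          = ((h.filter pvNonJ).filter (fun p => p.2 == M)).map (fun p => p.1) := by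
        rw [List.filter_map, List.filter_filter]
        refine congrArg (List.map _) (List.filter_congr (fun p hp => ?_))
        simp [Function.comp, pvNonJ, hget p hp]
      have hCsub : ∀ p ∈ (h.filter pvNonJ).filter (fun p => p.2 == M),
          p ∈ h.filter pvNonJ ∧ p.2 = M := fun p hp => by
        have := List.mem_filter.mp hp
        exact ⟨this.1, by simpa using this.2⟩
      have hCtab : ∀ p ∈ (h.filter pvNonJ).filter (fun p => p.2 == M), p.1 ∈ pvCards := fun p hp => by
        obtain ⟨hp1, hp2⟩ := hCsub p hp
        exact hstrtab p hp1 (fun q hq => hp2 ▸ hMmax q.2 (List.mem_map.mpr ⟨q, hq, rfl⟩))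
      have hrC : r ∈ (h.filter pvNonJ).filter (fun p => p.2 == M) :=
        List.mem_filter.mpr ⟨hrmem, by simp [hrM]⟩
      obtain ⟨t, ts, hsorted⟩ : ∃ t ts,
          PySem.List.sorted (((h.filter pvNonJ).filter (fun p => p.2 == M)).map (fun p => p.1))
            (fun x => CARD_STRENGTH.getD x 0) false = t :: ts := by
        cases hs : PySem.List.sorted (((h.filter pvNonJ).filter (fun p => p.2 == M)).map (fun p => p.1))
            (fun x => CARD_STRENGTH.getD x 0) false with
        | nil =>
          exfalso
          have := (PySem.List.sorted_eq_nil_iff _ _ _).mp hs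
          rw [List.map_eq_nil_iff] at this
          rw [this] at hrC
          exact absurd hrC (List.not_mem_nil)
        | cons a l => exact ⟨a, l, rfl⟩
      have htmem : t ∈ ((h.filter pvNonJ).filter (fun p => p.2 == M)).map (fun p => p.1) :=
        (PySem.List.mem_sorted _ _ _ t).mp (hsorted ▸ List.mem_cons_self)
      obtain ⟨pt, hptC, hpt1⟩ := List.mem_map.mp htmem
      have httab : t ∈ pvCards := hpt1 ▸ hCtab pt hptC
      have hrtab : r.1 ∈ pvCards := hCtab r hrC
      have hhead : CARD_STRENGTH.getD t 0 ≤ CARD_STRENGTH.getD r.1 0 :=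
        PySem.List.key_head_sorted_le _ _ hsorted r.1 (List.mem_map.mpr ⟨r, hrC, rfl⟩)
      have hrle : CARD_STRENGTH.getD r.1 13 ≤ CARD_STRENGTH.getD t 13 := by
        have h1 := (hrmin pt (hCsub pt hptC).1).2 (by rw [(hCsub pt hptC).2, hrM])
        rw [hpt1] at h1; exact h1
      have h013 : ∀ k ∈ pvCards, CARD_STRENGTH.getD k 0 = CARD_STRENGTH.getD k 13 := by decide
      have hteq : t = r.1 := by
        refine pvStrength_inj t httab r.1 hrtab ?_
        have h1 : CARD_STRENGTH.getD t 13 ≤ CARD_STRENGTH.getD r.1 13 := by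
          rw [← h013 t httab, ← h013 r.1 hrtab]; exact hhead
        omega
      have hA : apply_jokers h = (((PySem.Dict.mk h).modify t 0 (fun v => v + n)).erase "J").items := by
        simp only [apply_jokers, hc, hgj, Option.getD_some]
        rw [if_neg (by simp), if_neg h5]
        rw [show (PySem.Dict.mk h).keys = h.map (fun p => p.1) from rfl]
        rw [hkf, hvals, hM, Option.getD_some, hmc, hsorted]
      have hB : apply_jokers_alt h = (((PySem.Dict.mk h).modify r.1 0 (fun v => v + n)).erase "J").items := by
        simp only [apply_jokers_alt, hgj]
        rw [if_neg h5]
        rw [hfold]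
      rw [hA, hB, hteq]
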